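-- pv_equiv track=rewrite | github.com/okalldal/gf-exjobb | work/em.py | to_ids
-- ===== SOURCE A (Python) =====
-- def to_ids(occurences):
--     """ Converts the occurences to tuples with ids and counts
--
--     the ids can later be transformed back into respective
--     possibility using the conversion maps
--
--     :param occurences:
--     :return:
--     """
--     occurency_tuples = []
--     possibility2id = dict()
--     id2possibility = []
--     current_id = 0
--     for occurency, count in dict(occurences).items():
--         possibility_ids = []
--         for possibility in occurency:
--             if possibility not in possibility2id.keys():
--                 possibility2id[possibility] = current_id
--                 id2possibility.append(possibility)
--                 possibility_ids.append(current_id)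
--                 current_id = current_id + 1
--             else:
--                 possibility_ids.append(possibility2id[possibility])
--         if len(possibility_ids) > 0:
--             occurency_tuples.append((possibility_ids, count))
--     return occurency_tuples, id2possibility, possibility2id
-- ===== SOURCE B (Python) =====
-- def to_ids(occurences):
--     """ Converts the occurences to tuples with ids and counts
--
--     Two-phase rewrite: dedup the occurrence dict once, build the full
--     id index with dict.fromkeys/enumerate, then emit the tuples by
--     comprehension (same values as the original single interleaved loop).
--     """
--     occ = dict(occurences)
--     id2possibility = list(dict.fromkeys(p for key in occ for p in key))
--     possibility2id = {p: i for i, p in enumerate(id2possibility)}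
--     occurency_tuples = [([possibility2id[p] for p in key], count)
--                         for key, count in occ.items() if key]
--     return occurency_tuples, id2possibility, possibility2id
-- ===== Notes on version B (the rewrite author's own statement) =====
-- stated objective: idiomatic
-- what changed: Instead of one interleaved loop that grows the id index, the result tuples and the counter together, B deduplicates the occurrences once, builds the complete id index in a single dict.fromkeys/enumerate pass over the flattened keys, and then produces the tuples by a comprehension that only looks the index up.
import Mathlib
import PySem

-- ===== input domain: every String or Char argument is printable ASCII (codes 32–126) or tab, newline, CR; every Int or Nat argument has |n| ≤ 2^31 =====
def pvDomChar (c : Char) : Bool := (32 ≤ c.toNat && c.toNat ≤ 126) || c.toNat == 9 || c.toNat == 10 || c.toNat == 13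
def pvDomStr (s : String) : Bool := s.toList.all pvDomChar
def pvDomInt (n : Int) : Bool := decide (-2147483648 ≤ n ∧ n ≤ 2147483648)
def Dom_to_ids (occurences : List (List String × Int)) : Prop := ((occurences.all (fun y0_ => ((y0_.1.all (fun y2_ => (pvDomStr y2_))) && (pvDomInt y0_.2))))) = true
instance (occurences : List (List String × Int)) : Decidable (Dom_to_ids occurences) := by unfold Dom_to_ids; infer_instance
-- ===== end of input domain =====

-- B replaces A's single interleaved loop by: dedup once, build the whole id index first, then emit the tuples by map/filter (same values, idiomatic decomposition).


-- ===== PORT A =====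
-- inner loop body: 'for possibility in occurency: …' ; state = (possibility_ids, possibility2id, id2possibility, current_id)
def to_ids_inner (s : List Int × PySem.Dict String Int × List String × Int) (p : String) :
    List Int × PySem.Dict String Int × List String × Int :=
  if s.2.1.contains p = false then
    (s.1 ++ [s.2.2.2], s.2.1.insert p s.2.2.2, s.2.2.1 ++ [p], s.2.2.2 + 1)
  else
    -- possibility2id[possibility]: the key is present in this branch, so getD never uses the default
    (s.1 ++ [(s.2.1.get? p).getD 0], s.2.1, s.2.2.1, s.2.2.2)

-- outer loop body: 'for occurency, count in dict(occurences).items(): …' ; state = (occurency_tuples, possibility2id, id2possibility, current_id)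
def to_ids_outer (st : List (List Int × Int) × PySem.Dict String Int × List String × Int)
    (oc : List String × Int) : List (List Int × Int) × PySem.Dict String Int × List String × Int :=
  let inner := oc.1.foldl to_ids_inner ([], st.2.1, st.2.2.1, st.2.2.2)
  (if 0 < inner.1.length then st.1 ++ [(inner.1, oc.2)] else st.1, inner.2.1, inner.2.2.1, inner.2.2.2)

def to_ids (occurences : List (List String × Int)) :
    (List (List Int × Int)) × List String × (List (String × Int)) :=
  let res := ((PySem.Dict.ofList occurences).items).foldl to_ids_outer ([], PySem.Dict.empty, [], 0)
  (res.1, res.2.2.1, res.2.1.items)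

-- ===== PORT B =====
def to_ids_alt (occurences : List (List String × Int)) :
    (List (List Int × Int)) × List String × (List (String × Int)) :=
  let occ := PySem.Dict.ofList occurences
  let id2possibility := PySem.List.dedup (occ.keys.flatMap (fun k => k))
  let possibility2id :=
    (PySem.List.enumerate id2possibility 0).foldl (fun d iv => d.insert iv.2 iv.1) PySem.Dict.empty
  let tuples := (occ.items.filter (fun kc => !kc.1.isEmpty)).map
    -- possibility2id[p]: every possibility is in the index, so getD never uses the default
    (fun kc => (kc.1.map (fun p => possibility2id.getD p 0), kc.2))
  (tuples, id2possibility, possibility2id.items)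

-- ===== PRECONDITION & SPEC =====
def Spec_to_ids (occurences : List (List String × Int)) (out : (List (List Int × Int)) × List String × (List (String × Int))) : Prop := out = to_ids_alt occurences
instance (occurences : List (List String × Int)) (out : (List (List Int × Int)) × List String × (List (String × Int))) : Decidable (Spec_to_ids occurences out) := by unfold Spec_to_ids; infer_instance

-- ===== CLAIM (what is proved, stated in full; the proofs are below) =====
def Claim_equal_to_ids : Prop := ∀ (occurences : List (List String × Int)), Dom_to_ids occurences → Spec_to_ids occurences (to_ids occurences)

-- ===== LEMMAS AND PROOFS =====

-- the id dict determined by the id list: p ↦ its index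
def pvDs (s : Int) (l : List String) : PySem.Dict String Int :=
  PySem.Dict.mk ((PySem.List.enumerate l s).map (fun iv => (iv.2, iv.1)))

def pvD (l : List String) : PySem.Dict String Int := pvDs 0 l

-- the final id list produced by folding Set.update over the keys
def pvL (ks : List (List String × Int)) (l : List String) : List String :=
  ks.foldl (fun l kc => PySem.Set.update l kc.1) l

theorem pvDs_get?_append (s : Int) (l t : List String) (p : String) (h : p ∈ l) :
    (pvDs s (l ++ t)).get? p = (pvDs s l).get? p := by
  induction l generalizing s with
  | nil => exact absurd h (List.not_mem_nil)
  | cons x ls ih =>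
    simp only [pvDs, List.cons_append, PySem.List.enumerate_cons, List.map_cons,
      PySem.Dict.get?_mk_cons]
    by_cases hx : x == p
    · simp [hx]
    · simp only [hx, Bool.false_eq_true, if_false]
      have hm : p ∈ ls := by
        rcases List.mem_cons.mp h with h1 | h2
        · exact absurd (beq_iff_eq.mpr h1.symm) (by simpa using hx)
        · exact h2
      exact ih (s + 1) hm

theorem pvD_getD_append (l t : List String) (p : String) (h : p ∈ l) :
    (pvD (l ++ t)).getD p 0 = (pvD l).getD p 0 := by
  simp only [PySem.Dict.getD_eq_get?_getD, pvD, pvDs_get?_append 0 l t p h]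

theorem pvD_keys (l : List String) : (pvD l).keys = l := by
  simp only [pvD, pvDs, PySem.Dict.keys]
  show (((PySem.List.enumerate l 0).map _).map _) = l
  simp [List.map_map, Function.comp_def, PySem.List.map_snd_enumerate]

theorem pvD_contains (l : List String) (p : String) :
    (pvD l).contains p = decide (p ∈ l) := by
  rw [PySem.Dict.contains_eq_decide_mem_keys, pvD_keys]

theorem pvD_append_one (l : List String) (p : String) (h : p ∉ l) :
    pvD (l ++ [p]) = (pvD l).insert p (l.length : Int) := by
  apply PySem.Dict.ext
  rw [PySem.Dict.items_insert_of_not_contains (pvD l) ((l.length : Int))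
    (by rw [pvD_contains]; simpa using h)]
  simp only [pvD, pvDs, PySem.List.enumerate_append, List.map_append]
  simp [PySem.List.enumerate_cons]

theorem pvD_getD_new (l : List String) (p : String) (h : p ∉ l) :
    (pvD (l ++ [p])).getD p 0 = (l.length : Int) := by
  rw [pvD_append_one l p h, PySem.Dict.getD_insert_self]

-- the inner loop, fully characterised: ids are the indices in the UPDATED list
theorem inner_loop (key : List String) : ∀ (l : List String) (ids0 : List Int),
    key.foldl to_ids_inner (ids0, pvD l, l, (l.length : Int)) =
      (ids0 ++ key.map (fun p => (pvD (PySem.Set.update l key)).getD p 0),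
        pvD (PySem.Set.update l key), PySem.Set.update l key,
        ((PySem.Set.update l key).length : Int)) := by
  induction key with
  | nil => intro l ids0; simp [PySem.Set.update_nil]
  | cons p rest ih =>
    intro l ids0
    rw [List.foldl_cons, PySem.Set.update_cons]
    by_cases hp : p ∈ l
    · have hstep : to_ids_inner (ids0, pvD l, l, (l.length : Int)) p =
          (ids0 ++ [(pvD l).getD p 0], pvD l, l, (l.length : Int)) := by
        simp [to_ids_inner, pvD_contains, hp, PySem.Dict.getD_eq_get?_getD]
      rw [hstep, PySem.Set.add_of_mem hp, ih]
      obtain ⟨t, ht⟩ : ∃ t, PySem.Set.update l rest = l ++ t :=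
        ⟨_, PySem.Set.update_eq_append_filter l rest⟩
      have hid : (pvD (PySem.Set.update l rest)).getD p 0 = (pvD l).getD p 0 := by
        rw [ht]; exact pvD_getD_append l t p hp
      simp [hid, List.append_assoc]
    · have hstep : to_ids_inner (ids0, pvD l, l, (l.length : Int)) p =
          (ids0 ++ [(l.length : Int)], pvD (l ++ [p]), l ++ [p], ((l ++ [p]).length : Int)) := by
        simp [to_ids_inner, pvD_contains, hp, pvD_append_one l p hp]
      rw [hstep, PySem.Set.add_of_not_mem hp, ih]
      obtain ⟨t, ht⟩ : ∃ t, PySem.Set.update (l ++ [p]) rest = (l ++ [p]) ++ t :=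
        ⟨_, PySem.Set.update_eq_append_filter (l ++ [p]) rest⟩
      have hid : (pvD (PySem.Set.update (l ++ [p]) rest)).getD p 0 = (l.length : Int) := by
        rw [ht, pvD_getD_append (l ++ [p]) t p (by simp), pvD_getD_new l p hp]
      simp [hid, List.append_assoc]

theorem pvL_extends (ks : List (List String × Int)) : ∀ l, ∃ t, pvL ks l = l ++ t := by
  induction ks with
  | nil => intro l; exact ⟨[], by simp [pvL]⟩
  | cons k rest ih =>
    intro l
    obtain ⟨t, ht⟩ := ih (PySem.Set.update l k.1)
    exact ⟨_, by rw [pvL, List.foldl_cons, ← pvL, ht, PySem.Set.update_eq_append_filter,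
      List.append_assoc]⟩

-- the outer loop, fully characterised: tuples are B's filter/map against the FINAL id list
theorem outer_loop (ks : List (List String × Int)) :
    ∀ (l : List String) (ts : List (List Int × Int)),
    ks.foldl to_ids_outer (ts, pvD l, l, (l.length : Int)) =
      (ts ++ (ks.filter (fun kc => !kc.1.isEmpty)).map
          (fun kc => (kc.1.map (fun p => (pvD (pvL ks l)).getD p 0), kc.2)),
        pvD (pvL ks l), pvL ks l, ((pvL ks l).length : Int)) := by
  induction ks with
  | nil => intro l ts; simp [pvL]
  | cons k rest ih =>
    intro l ts
    rw [List.foldl_cons]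
    have houter : to_ids_outer (ts, pvD l, l, (l.length : Int)) k =
        (if 0 < k.1.length then
            ts ++ [(k.1.map (fun p => (pvD (PySem.Set.update l k.1)).getD p 0), k.2)]
          else ts,
          pvD (PySem.Set.update l k.1), PySem.Set.update l k.1,
          ((PySem.Set.update l k.1).length : Int)) := by
      simp [to_ids_outer, inner_loop k.1 l []]
    rw [houter]
    have hL : pvL (k :: rest) l = pvL rest (PySem.Set.update l k.1) := by
      simp [pvL]
    by_cases hk : k.1 = []
    · simp only [hk, List.length_nil, lt_self_iff_false, if_false]
      rw [ih, hL]
      simp [hk]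
    · have hlen : 0 < k.1.length := List.length_pos_iff.mpr hk
      simp only [hlen, if_true]
      rw [ih, hL]
      have hsta : ∀ p ∈ k.1,
          (pvD (pvL rest (PySem.Set.update l k.1))).getD p 0 =
            (pvD (PySem.Set.update l k.1)).getD p 0 := by
        intro p hp
        obtain ⟨t, ht⟩ := pvL_extends rest (PySem.Set.update l k.1)
        rw [ht]
        exact pvD_getD_append _ t p (by rw [PySem.Set.mem_update]; exact Or.inr hp)
      have hmap : k.1.map (fun p => (pvD (PySem.Set.update l k.1)).getD p 0) =
          k.1.map (fun p => (pvD (pvL rest (PySem.Set.update l k.1))).getD p 0) :=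
        List.map_congr_left (fun p hp => (hsta p hp).symm)
      simp [hk, hmap, List.append_assoc]

-- the final id list is the ordered dedup of the flattened keys
theorem pvL_eq_ofList (ks : List (List String × Int)) :
    ∀ acc : List String, pvL ks (PySem.Set.ofList acc) =
      PySem.Set.ofList (acc ++ ks.flatMap (fun kc => kc.1)) := by
  induction ks with
  | nil => intro acc; simp [pvL]
  | cons k rest ih =>
    intro acc
    rw [pvL, List.foldl_cons, ← pvL, ← PySem.Set.ofList_append, ih]
    simp [List.append_assoc]

-- B's index dict IS pvD of B's id list
theorem alt_dict (l : List String) (hnd : l.Nodup) :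
    (PySem.List.enumerate l 0).foldl (fun d iv => d.insert iv.2 iv.1) PySem.Dict.empty =
      pvD l := by
  apply PySem.Dict.ext
  rw [PySem.Dict.items_foldl_insert_fresh (PySem.List.enumerate l 0) (fun iv => iv.2)
    (fun iv => iv.1) PySem.Dict.empty
    (by intro a _; simp [PySem.Dict.contains_empty])
    (by rw [PySem.List.map_snd_enumerate]; exact hnd)]
  simp [pvD, pvDs, show (PySem.Dict.empty : PySem.Dict String Int).items = [] from rfl]

-- ===== VERDICT (by name: the statement is the Claim_ definition above) =====
theorem to_ids_spec : Claim_equal_to_ids := by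
  intro occurences _
  unfold Spec_to_ids
  simp only [to_ids, to_ids_alt]
  have hfin : PySem.List.dedup ((PySem.Dict.ofList occurences).keys.flatMap (fun k => k)) =
      pvL (PySem.Dict.ofList occurences).items [] := by
    rw [PySem.List.dedup_eq_ofList]
    have hkeys : (PySem.Dict.ofList occurences).keys.flatMap (fun k => k) =
        (PySem.Dict.ofList occurences).items.flatMap (fun kc => kc.1) := by
      simp only [PySem.Dict.keys, List.flatMap_map]
    rw [hkeys]
    have := pvL_eq_ofList (PySem.Dict.ofList occurences).items []
    simp only [PySem.Set.ofList_nil, List.nil_append] at this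
    exact this.symm
  have hnd : (pvL (PySem.Dict.ofList occurences).items []).Nodup := by
    rw [← hfin, PySem.List.dedup_eq_ofList]; exact PySem.Set.nodup_ofList _
  rw [hfin, alt_dict _ hnd]
  have hout := outer_loop (PySem.Dict.ofList occurences).items [] []
  simp only [List.length_nil, Nat.cast_zero] at hout
  rw [show pvD [] = (PySem.Dict.empty : PySem.Dict String Int) from rfl] at hout
  rw [hout]
  simp
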